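-- pv_equiv track=rewrite | github.com/STOCD/OSCR--Archive | src/OSCR.py | getFlags
-- ===== SOURCE A (Python) =====
-- def getFlags(flagUpdater):  # returns flags combat lines
--     crit = False
--     miss = False
--     flank = False
--     kill = False
--     if not flagUpdater == "*":
--         flagUpdater = flagUpdater.split("|")
--         for flag in flagUpdater:
--             if flag == "Miss":
--                 miss = True
--             if flag == "Critical":
--                 crit = True
--             if flag == "Flank":
--                 flank = True
--             if flag == "Kill":
--                 kill = True
--     return crit, miss, flank, kill
-- ===== SOURCE B (Python) =====
-- def getFlags(flagUpdater):  # returns flags combat lines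
--     padded = "|" + flagUpdater + "|"
--     return ("|Critical|" in padded, "|Miss|" in padded,
--             "|Flank|" in padded, "|Kill|" in padded)
-- ===== Notes on version B (the rewrite author's own statement) =====
-- stated objective: alternative
-- what changed: B never tokenizes: instead of splitting on the bar separator and scanning the token list with four flag-setting branches, it pads the input with a bar on each end and answers each flag by a single delimited-substring search, correct because a split token equals a flag name exactly when the bar-delimited flag name occurs in the bar-padded string; A's asterisk special case disappears since the padded asterisk contains no delimited flag.
import Mathlib
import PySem

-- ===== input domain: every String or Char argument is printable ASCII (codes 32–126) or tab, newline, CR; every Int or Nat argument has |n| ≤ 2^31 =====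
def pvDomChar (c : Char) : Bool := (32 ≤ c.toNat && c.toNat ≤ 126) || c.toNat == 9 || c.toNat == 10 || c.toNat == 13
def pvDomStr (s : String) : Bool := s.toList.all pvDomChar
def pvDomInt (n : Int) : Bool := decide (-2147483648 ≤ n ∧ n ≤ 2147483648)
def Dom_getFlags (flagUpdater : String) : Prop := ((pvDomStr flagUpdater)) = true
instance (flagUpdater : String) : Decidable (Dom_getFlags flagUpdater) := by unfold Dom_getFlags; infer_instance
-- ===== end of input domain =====

-- B drops the split-and-scan entirely: it pads the string with '|' on both ends and answers
-- each flag by one delimited-substring search (alternative algorithm, same cost).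


-- ===== PORT A =====
-- literal transliteration: guard on "*", split on "|", loop updating four booleans
def getFlags (flagUpdater : String) : Bool × Bool × Bool × Bool :=
  let crit := false
  let miss := false
  let flank := false
  let kill := false
  if ¬ (flagUpdater == "*") then
    let parts := (PySem.Str.split? flagUpdater "|").getD []
    let st := parts.foldl (fun (st : Bool × Bool × Bool × Bool) flag =>
      let (crit, miss, flank, kill) := st
      let miss := if flag == "Miss" then true else miss
      let crit := if flag == "Critical" then true else crit
      let flank := if flag == "Flank" then true else flank
      let kill := if flag == "Kill" then true else kill
      (crit, miss, flank, kill)) (crit, miss, flank, kill)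
    st
  else
    (crit, miss, flank, kill)

-- ===== PORT B =====
-- pad with '|' on both ends, then each flag is one delimited-substring test
def getFlags_alt (flagUpdater : String) : Bool × Bool × Bool × Bool :=
  let padded := "|" ++ flagUpdater ++ "|"
  (PySem.Str.isIn "|Critical|" padded, PySem.Str.isIn "|Miss|" padded,
   PySem.Str.isIn "|Flank|" padded, PySem.Str.isIn "|Kill|" padded)

-- ===== PRECONDITION & SPEC =====
def Spec_getFlags (flagUpdater : String) (out : Bool × Bool × Bool × Bool) : Prop := out = getFlags_alt flagUpdater
instance (flagUpdater : String) (out : Bool × Bool × Bool × Bool) : Decidable (Spec_getFlags flagUpdater out) := by unfold Spec_getFlags; infer_instance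

-- ===== CLAIM (what is proved, stated in full; the proofs are below) =====
def Claim_equal_getFlags : Prop := ∀ (flagUpdater : String), Dom_getFlags flagUpdater → Spec_getFlags flagUpdater (getFlags flagUpdater)

-- ===== LEMMAS AND PROOFS =====

-- the fold's invariant: each component becomes (initial ∨ the flag occurs in the list)
theorem foldl_flags (l : List String) (c m f k : Bool) :
    l.foldl (fun (st : Bool × Bool × Bool × Bool) flag =>
      let (crit, miss, flank, kill) := st
      let miss := if flag == "Miss" then true else miss
      let crit := if flag == "Critical" then true else crit
      let flank := if flag == "Flank" then true else flank
      let kill := if flag == "Kill" then true else kill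
      (crit, miss, flank, kill)) (c, m, f, k)
    = (c || l.contains "Critical", m || l.contains "Miss",
       f || l.contains "Flank", k || l.contains "Kill") := by
  induction l generalizing c m f k with
  | nil => simp
  | cons hd tl ih =>
    have key : ∀ (x : String) (b : Bool),
        ((if hd == x then true else b) || tl.contains x) = (b || (x == hd || tl.contains x)) := by
      intro x b
      by_cases h : hd = x
      · subst h; simp
      · rw [beq_eq_false_iff_ne.mpr (Ne.symm h)]; simp [h]
    simp only [List.foldl_cons, ih, List.contains_cons, Prod.mk.injEq]
    exact ⟨key _ _, key _ _, key _ _, key _ _⟩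

-- reference recursion for splitting on the single character '|'
def split1 : List Char → List (List Char)
  | [] => [[]]
  | c :: r => if c = '|' then [] :: split1 r
              else (c :: (split1 r).headI) :: (split1 r).tail

theorem split1_ne_nil (s : List Char) : split1 s ≠ [] := by
  cases s with
  | nil => simp [split1]
  | cons c r => by_cases h : c = '|' <;> simp [split1, h]

theorem split1_cons_headI_tail (s : List Char) :
    (split1 s).headI :: (split1 s).tail = split1 s := by
  cases h : split1 s with
  | nil => exact absurd h (split1_ne_nil s)
  | cons a t => rfl

-- PySem's fuel-based splitter agrees with split1 on separator "|"
theorem splitOn_go_eq : ∀ (fuel : Nat) (l cur : List Char) (acc : List (List Char)),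
    l.length < fuel →
    PySem.Chars.splitOn.go ['|'] fuel l cur acc
      = acc.reverse ++ ((cur.reverse ++ (split1 l).headI) :: (split1 l).tail) := by
  intro fuel
  induction fuel with
  | zero => intro l cur acc h; omega
  | succ n ih =>
    intro l cur acc h
    cases l with
    | nil => simp [PySem.Chars.splitOn.go, split1]
    | cons c rest =>
      by_cases hc : c = '|'
      · subst hc
        have hp : List.isPrefixOf ['|'] ('|' :: rest) = true := by simp [List.isPrefixOf]
        rw [show PySem.Chars.splitOn.go ['|'] (n+1) ('|' :: rest) cur acc
              = PySem.Chars.splitOn.go ['|'] n (List.drop (List.length ['|']) ('|' :: rest)) [] (cur.reverse :: acc) by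
              simp [PySem.Chars.splitOn.go, hp]]
        simp only [List.length_singleton, List.drop_succ_cons, List.drop_zero]
        rw [ih rest [] (cur.reverse :: acc) (by simp at h ⊢; omega)]
        simp [split1, split1_cons_headI_tail]
      · have hp : List.isPrefixOf ['|'] (c :: rest) = false := by
          simp [List.isPrefixOf]; exact fun hh => absurd hh.symm hc
        rw [show PySem.Chars.splitOn.go ['|'] (n+1) (c :: rest) cur acc
              = PySem.Chars.splitOn.go ['|'] n rest (c :: cur) acc by
              simp [PySem.Chars.splitOn.go, hp]]
        rw [ih rest (c :: cur) acc (by simp at h ⊢; omega)]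
        simp [split1, hc]

theorem splitOn_eq (s : List Char) : PySem.Chars.splitOn s ['|'] = split1 s := by
  unfold PySem.Chars.splitOn
  rw [splitOn_go_eq (s.length + 1) s [] [] (by omega)]
  simp [split1_cons_headI_tail]

-- prefix characterisation: f followed by a bar is a prefix of s followed by a bar
-- exactly when f is the first token of s
theorem prefix_iff_headI (f : List Char) (hf : '|' ∉ f) :
    ∀ s : List Char, (f ++ ['|'] <+: s ++ ['|']) ↔ f = (split1 s).headI := by
  induction f with
  | nil =>
    intro s
    cases s with
    | nil => simp [split1]
    | cons c r =>
      by_cases hc : c = '|'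
      · subst hc; simp [split1]
      · constructor
        · intro hp
          obtain ⟨t, ht⟩ := hp
          simp only [List.nil_append, List.cons_append, List.cons.injEq] at ht
          exact absurd ht.1.symm hc
        · intro hh; simp [split1, hc] at hh
  | cons a f' ih =>
    have hf' : '|' ∉ f' := fun h => hf (List.mem_cons_of_mem _ h)
    have ha : a ≠ '|' := fun h => hf (h ▸ List.mem_cons_self)
    intro s
    cases s with
    | nil =>
      constructor
      · intro hp
        have := hp.length_le
        simp at this
      · intro hh; simp [split1] at hh
    | cons c r =>
      by_cases hc : c = '|'
      · subst hc
        constructor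
        · intro hp
          obtain ⟨t, ht⟩ := hp
          simp only [List.cons_append, List.cons.injEq] at ht
          exact absurd ht.1 ha
        · intro hh; simp [split1] at hh
      · rw [show (a :: f') ++ ['|'] = a :: (f' ++ ['|']) by rfl,
            show (c :: r) ++ ['|'] = c :: (r ++ ['|']) by rfl, List.cons_prefix_cons]
        simp [split1, hc, ih hf' r]

-- an inner occurrence ("|f|" inside s++"|") means f is one of the later tokens
theorem infix_tail_iff (f : List Char) (hf : '|' ∉ f) :
    ∀ s : List Char, (('|' :: (f ++ ['|'])) <:+: (s ++ ['|'])) ↔ f ∈ (split1 s).tail := by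
  intro s
  induction s with
  | nil =>
    constructor
    · intro hi
      have := hi.length_le
      simp at this
    · intro hh; simp [split1] at hh
  | cons c r ih =>
    rw [show (c :: r) ++ ['|'] = c :: (r ++ ['|']) by rfl, List.infix_cons_iff]
    by_cases hc : c = '|'
    · subst hc
      rw [List.cons_prefix_cons]
      simp only [true_and]
      rw [prefix_iff_headI f hf r, ih]
      constructor
      · rintro (h | h)
        · simp [split1]
          rw [← split1_cons_headI_tail r]
          exact h ▸ List.mem_cons_self
        · simp [split1]
          rw [← split1_cons_headI_tail r]
          exact List.mem_cons_of_mem _ h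
      · intro h
        simp [split1] at h
        rw [← split1_cons_headI_tail r] at h
        rcases List.mem_cons.mp h with h | h
        · exact Or.inl h
        · exact Or.inr h
    · constructor
      · rintro (h | h)
        · exfalso
          obtain ⟨t, ht⟩ := h
          simp only [List.cons_append, List.cons.injEq] at ht
          exact hc ht.1.symm
        · have := ih.mp h
          simpa [split1, hc] using this
      · intro h
        simp [split1, hc] at h
        exact Or.inr (ih.mpr h)

-- the delimited-substring test equals token membership
theorem infix_iff_mem (f : List Char) (hf : '|' ∉ f) (s : List Char) :
    (('|' :: (f ++ ['|'])) <:+: ('|' :: (s ++ ['|']))) ↔ f ∈ split1 s := by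
  rw [List.infix_cons_iff, List.cons_prefix_cons]
  simp only [true_and]
  rw [prefix_iff_headI f hf s, infix_tail_iff f hf s]
  have hm := List.mem_cons (a := f) (b := (split1 s).headI) (l := (split1 s).tail)
  rw [split1_cons_headI_tail s] at hm
  exact hm.symm

-- bridge: one padded substring test = contains on the split parts (as Strings)
theorem flag_eq (s : String) (f p : String) (hp : p.toList = '|' :: (f.toList ++ ['|']))
    (hf : '|' ∉ f.toList) :
    PySem.Str.isIn p ("|" ++ s ++ "|")
      = (List.map String.ofList (split1 s.toList)).contains f := by
  apply Bool.coe_iff_coe.mp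
  rw [PySem.Str.isIn, PySem.Chars.isIn_iff_infix, hp]
  have hpad : ("|" ++ s ++ "|").toList = '|' :: (s.toList ++ ['|']) := by
    simp
  rw [hpad, infix_iff_mem f.toList hf s.toList]
  simp only [List.contains_eq_mem, decide_eq_true_eq, List.mem_map]
  constructor
  · intro h; exact ⟨f.toList, h, by simp⟩
  · rintro ⟨l, hl, he⟩
    have : l = f.toList := by rw [← he]; simp
    exact this ▸ hl

-- ===== VERDICT (by name: the statement is the Claim_ definition above) =====
theorem getFlags_spec : Claim_equal_getFlags := by
  unfold Claim_equal_getFlags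
  intro s _
  unfold Spec_getFlags getFlags getFlags_alt
  by_cases hs : s = "*"
  · subst hs
    decide
  · have hb : ¬ ((s == "*") = true) := by simp [hs]
    simp only [hb, foldl_flags, Bool.false_or]
    have hsplit : (PySem.Str.split? s "|").getD []
        = List.map String.ofList (split1 s.toList) := by
      simp [PySem.Str.split?, PySem.Chars.split?, splitOn_eq]
    rw [hsplit,
        ← flag_eq s "Critical" "|Critical|" (by decide) (by decide),
        ← flag_eq s "Miss" "|Miss|" (by decide) (by decide),
        ← flag_eq s "Flank" "|Flank|" (by decide) (by decide),
        ← flag_eq s "Kill" "|Kill|" (by decide) (by decide)]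
    simp
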